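-- pv_equiv track=rewrite | github.com/asarandi/kami2-solver | search.py | configo
-- ===== SOURCE A (Python) =====
-- def configo(board):
--     d = {}
--     for cell in board:
--         if cell not in d:
--             d[cell] = 0
--         d[cell] += 1
--     conf = sorted(d.items(), key=lambda kv: kv[0])
--     return tuple(conf)
-- ===== SOURCE B (Python) =====
-- def configo(board):
--     s = sorted(board)
--     n = len(s)
--     out = []
--     i = 0
--     while i < n:
--         j = i + 1
--         while j < n and s[j] == s[i]:
--             j += 1
--         out.append((s[i], j - i))
--         i = j
--     return tuple(out)
-- ===== Notes on version B (the rewrite author's own statement) =====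
-- stated objective: alternative
-- what changed: B sorts the board first and emits (value, run length) pairs in one grouping pass over the sorted list, instead of counting into a dict and sorting the dict items afterwards.
import Mathlib
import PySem

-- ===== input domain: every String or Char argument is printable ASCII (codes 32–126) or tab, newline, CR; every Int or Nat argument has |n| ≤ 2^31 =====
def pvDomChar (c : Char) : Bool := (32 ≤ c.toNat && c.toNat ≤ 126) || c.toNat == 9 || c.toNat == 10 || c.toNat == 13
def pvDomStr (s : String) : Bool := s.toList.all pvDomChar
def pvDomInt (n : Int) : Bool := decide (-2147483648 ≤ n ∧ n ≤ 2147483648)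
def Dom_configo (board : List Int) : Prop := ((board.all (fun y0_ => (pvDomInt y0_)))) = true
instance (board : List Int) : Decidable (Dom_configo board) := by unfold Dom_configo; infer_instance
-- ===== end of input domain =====

-- B replaces A's dict-count-then-sort by sort-first then one run-length grouping pass (alternative algorithm, same cost).

-- ===== PORT A =====
def configo (board : List Int) : List (Int × Int) :=
  let d := board.foldl (fun d cell =>
    let d := if d.contains cell then d else d.insert cell 0
    d.insert cell (d.getD cell 0 + 1)) PySem.Dict.empty
  PySem.List.sorted d.items (fun kv => kv.1) false

-- ===== PORT B =====
-- inner while loop: length of the leading run of elements equal to x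
def runLen (x : Int) : List Int → Nat
  | [] => 0
  | y :: ys => if y = x then runLen x ys + 1 else 0

-- outer while loop: emit (s[i], j-i) and continue at i = j
def rle : List Int → List (Int × Int)
  | [] => []
  | x :: xs =>
      let r := runLen x xs
      (x, (1 + r : Int)) :: rle (xs.drop r)
termination_by s => s.length
decreasing_by simp [List.length_drop]

def configo_alt (board : List Int) : List (Int × Int) :=
  rle (PySem.List.sorted board (fun x => x) false)

-- ===== PRECONDITION & SPEC =====
def Spec_configo (board : List Int) (out : List (Int × Int)) : Prop := out = configo_alt board
instance (board : List Int) (out : List (Int × Int)) : Decidable (Spec_configo board out) := by unfold Spec_configo; infer_instance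

-- ===== CLAIM (what is proved, stated in full; the proofs are below) =====
def Claim_equal_configo : Prop := ∀ (board : List Int), Dom_configo board → Spec_configo board (configo board)

-- ===== LEMMAS AND PROOFS =====

theorem rle_cons (x : Int) (xs : List Int) :
    rle (x :: xs) = (x, (1 + (runLen x xs : Int))) :: rle (xs.drop (runLen x xs)) := by
  rw [rle]


-- A's loop body equals the canonical counter step
theorem configo_step_eq (d : PySem.Dict Int Int) (cell : Int) :
    (let d' := if d.contains cell then d else d.insert cell 0
     d'.insert cell (d'.getD cell 0 + 1)) = d.insert cell (d.getD cell 0 + 1) := by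
  by_cases h : d.contains cell
  · simp [h]
  · simp only [h, Bool.false_eq_true, if_false]
    rw [PySem.Dict.getD_insert_self, PySem.Dict.insert_insert_self,
        PySem.Dict.getD_of_not_contains _ _ (by simpa using h)]

theorem take_runLen (x : Int) (xs : List Int) : ∀ y ∈ xs.take (runLen x xs), y = x := by
  induction xs with
  | nil => simp
  | cons y ys ih =>
    by_cases h : y = x
    · simpa [runLen, h] using ih
    · simp [runLen, h]

theorem drop_runLen (x : Int) (xs : List Int) :
    xs.drop (runLen x xs) = [] ∨ ∃ h t, xs.drop (runLen x xs) = h :: t ∧ h ≠ x := by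
  induction xs with
  | nil => simp
  | cons y ys ih =>
    by_cases h : y = x
    · simpa [runLen, h] using ih
    · exact Or.inr ⟨y, ys, by simp [runLen, h], h⟩

-- every element after the run is ≠ x, given sortedness
theorem drop_runLen_ne (x : Int) (xs : List Int) (hp : xs.Pairwise (· ≤ ·))
    (hx : ∀ y ∈ xs, x ≤ y) : ∀ y ∈ xs.drop (runLen x xs), x < y := by
  rcases drop_runLen x xs with h | ⟨a, t, heq, hne⟩
  · simp [h]
  · intro y hy
    rw [heq] at hy
    have hsub : (a :: t).Sublist xs := heq ▸ List.drop_sublist _ _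
    have hpd : (a :: t).Pairwise (· ≤ ·) := hp.sublist hsub
    have hax : x < a := lt_of_le_of_ne (hx a (hsub.subset (by simp))) (Ne.symm hne)
    cases hy with
    | head => exact hax
    | tail _ hy => exact lt_of_lt_of_le hax ((List.pairwise_cons.mp hpd).1 y hy)

theorem count_split (x : Int) (xs : List Int) (k : Int) :
    xs.count k = (xs.take (runLen x xs)).count k + (xs.drop (runLen x xs)).count k := by
  rw [← List.count_append, List.take_append_drop]

theorem count_take_eq_zero (x : Int) (xs : List Int) {k : Int} (hk : k ≠ x) :
    (xs.take (runLen x xs)).count k = 0 := by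
  rw [List.count_eq_zero]
  intro hmem
  exact hk (take_runLen x xs k hmem)

theorem count_take_self (x : Int) (xs : List Int) :
    (xs.take (runLen x xs)).count x = runLen x xs := by
  have hlen : runLen x xs ≤ xs.length := by
    induction xs with
    | nil => simp [runLen]
    | cons y ys ih =>
      by_cases h : y = x
      · simp [runLen, h]; omega
      · simp [runLen, h]
  rw [List.count_eq_length.mpr (fun y hy => (take_runLen x xs y hy).symm), List.length_take]
  omega

-- members of rle s have first component in s
theorem rle_fst_mem : ∀ (s : List Int) (p : Int × Int), p ∈ rle s → p.1 ∈ s := by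
  intro s
  induction s using rle.induct with
  | case1 => simp [rle]
  | case2 x xs r ih =>
    intro p hp
    rw [rle_cons] at hp
    rcases List.mem_cons.mp hp with rfl | hp
    · simp
    · exact List.mem_cons_of_mem x ((List.drop_subset _ _) (ih p hp))

-- the key lemma: on a sorted list, rle is a permutation of the counter items and strictly increasing in keys
theorem rle_key : ∀ (s : List Int), s.Pairwise (· ≤ ·) →
    (rle s).Perm ((PySem.Set.ofList s).map (fun k => (k, (s.count k : Int)))) ∧
    (rle s).Pairwise (fun a b => a.1 < b.1) := by
  intro s
  induction s using rle.induct with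
  | case1 => intro _; simp [rle]
  | case2 x xs r ih =>
    intro hp
    have hr : r = runLen x xs := rfl
    have hx : ∀ y ∈ xs, x ≤ y := (List.pairwise_cons.mp hp).1
    have hpxs : xs.Pairwise (· ≤ ·) := (List.pairwise_cons.mp hp).2
    have hpd : (xs.drop r).Pairwise (· ≤ ·) := hpxs.sublist (List.drop_sublist _ _)
    have hne : ∀ y ∈ xs.drop r, x < y := by
      rw [hr]; exact drop_runLen_ne x xs hpxs hx
    obtain ⟨ihp, ihpw⟩ := ih hpd
    -- counts
    have hcx : ((x :: xs).count x : Int) = 1 + (r : Int) := by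
      rw [List.count_cons_self, count_split x xs x, count_take_self,
          List.count_eq_zero.mpr (fun h => lt_irrefl x (hne x (hr ▸ h)))]
      push_cast [← hr]; ring
    have hck : ∀ k ∈ xs.drop r, ((xs.drop r).count k : Int) = ((x :: xs).count k : Int) := by
      intro k hk
      have hkx : k ≠ x := fun h => lt_irrefl x (h ▸ hne k hk)
      have h1 : (x :: xs).count k = xs.count k := by
        simp [Ne.symm hkx]
      have h2 : xs.count k = (xs.drop r).count k := by
        rw [hr, count_split x xs k, count_take_eq_zero x xs hkx, Nat.zero_add]
      rw [h1, h2]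
    -- sets
    have hset : (PySem.Set.ofList (xs.drop r)).Perm (PySem.Set.discard (PySem.Set.ofList xs) x) := by
      rw [List.perm_ext_iff_of_nodup (PySem.Set.nodup_ofList _)
          (PySem.Set.nodup_discard _ _ (PySem.Set.nodup_ofList _))]
      intro k
      rw [PySem.Set.mem_ofList, PySem.Set.mem_discard, PySem.Set.mem_ofList]
      constructor
      · intro hk
        exact ⟨(List.drop_subset _ _) hk, fun h => lt_irrefl x (h ▸ hne k hk)⟩
      · rintro ⟨hk, hkx⟩
        have : k ∈ xs.take r ++ xs.drop r := by rwa [List.take_append_drop]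
        rcases List.mem_append.mp this with h | h
        · exact absurd (take_runLen x xs k (hr ▸ h)) hkx
        · exact h
    constructor
    · rw [rle_cons, ← hr]
      rw [PySem.Set.ofList_cons, List.map_cons]
      have hhead : ((x : Int), (1 + (r : Int))) = (x, ((x :: xs).count x : Int)) := by
        rw [hcx]
      rw [hhead]
      refine List.Perm.cons _ (ihp.trans ?_)
      have hm1 : (PySem.Set.ofList (xs.drop r)).map (fun k => (k, ((xs.drop r).count k : Int)))
          = (PySem.Set.ofList (xs.drop r)).map (fun k => (k, ((x :: xs).count k : Int))) := by
        apply List.map_congr_left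
        intro k hk
        rw [hck k (by simpa [PySem.Set.mem_ofList] using hk)]
      rw [hm1]
      exact hset.map _
    · rw [rle_cons, ← hr]
      rw [List.pairwise_cons]
      exact ⟨fun p hp' => hne p.1 (rle_fst_mem _ p hp'), ihpw⟩

-- A's dict equals the canonical counter
theorem configo_eq_sorted_items (board : List Int) :
    configo board = PySem.List.sorted
      ((PySem.Set.ofList board).map (fun k => (k, (board.count k : Int))))
      (fun kv => kv.1) false := by
  unfold configo
  have hstep : (fun (d : PySem.Dict Int Int) (cell : Int) =>
      let d' := if d.contains cell then d else d.insert cell 0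
      d'.insert cell (d'.getD cell 0 + 1)) = fun d x => d.insert x (d.getD x 0 + 1) := by
    funext d cell
    exact configo_step_eq d cell
  simp only [hstep, PySem.Dict.foldl_insert_getD_add_one_eq_counter, PySem.Dict.items_counter]

theorem configo_eq_alt (board : List Int) : configo board = configo_alt board := by
  rw [configo_eq_sorted_items]
  unfold configo_alt
  set s := PySem.List.sorted board (fun x => x) false with hs
  have hperm : s.Perm board := PySem.List.sorted_perm _ _ _
  have hpw : s.Pairwise (· ≤ ·) := by
    have := PySem.List.sorted_pairwise board (fun x => x) (κ := Int)
    simpa using this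
  obtain ⟨hp, hlt⟩ := rle_key s hpw
  have hm1 : (PySem.Set.ofList s).map (fun k => (k, (s.count k : Int)))
      = (PySem.Set.ofList s).map (fun k => (k, (board.count k : Int))) := by
    apply List.map_congr_left
    intro k _
    rw [hperm.count_eq k]
  have hsets : (PySem.Set.ofList s).Perm (PySem.Set.ofList board) := by
    rw [List.perm_ext_iff_of_nodup (PySem.Set.nodup_ofList _) (PySem.Set.nodup_ofList _)]
    intro k
    simp only [PySem.Set.mem_ofList]
    exact ⟨fun h => hperm.subset h, fun h => hperm.symm.subset h⟩
  have hP : (rle s).Perm ((PySem.Set.ofList board).map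
      (fun k => (k, (board.count k : Int)))) := by
    refine hp.trans ?_
    rw [hm1]
    exact hsets.map _
  exact PySem.List.sorted_eq_of_perm_of_pairwise_lt _ _ _ hP hlt

-- ===== VERDICT (by name: the statement is the Claim_ definition above) =====
theorem configo_spec : Claim_equal_configo := by
  intro board _
  exact configo_eq_alt board
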